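-- pv_equiv track=rewrite | github.com/jachinchoi11/leetcode-solutions | 3643-zero-array-transformation-ii/zero-array-transformation-ii.py | findZeroArray
-- ===== SOURCE A (Python) =====
-- def findZeroArray(nums, queries, middle):
--     copy = []
--     copy[:] = nums
--
--     track = [0] * (len(copy) + 1)
--
--     for index in range(middle):
--         left = queries[index][0]
--         right = queries[index][1]
--         value = queries[index][2]
--
--         track[left] -= value
--         track[right + 1] += value
--
--     currSubtract = 0
--
--     for index in range(len(copy)):
--         currSubtract += track[index]
--         copy[index] += currSubtract
--
--     for num in copy:
--         if num > 0:
--             return False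
--     return True
-- ===== SOURCE B (Python) =====
-- def findZeroArray(nums, queries, middle):
--     copy = list(nums)
--     for index in range(middle):
--         left = queries[index][0]
--         right = queries[index][1]
--         value = queries[index][2]
--         for i in range(left, right + 1):
--             copy[i] -= value
--     return all(num <= 0 for num in copy)
-- ===== Notes on version B (the rewrite author's own statement) =====
-- stated objective: simpler
-- what changed: B drops A's difference array and prefix-sum pass entirely and instead directly subtracts each of the first middle queries' value over its inclusive index range on a copy of nums, then checks all entries are <= 0.
-- outside the precondition, e.g. on findZeroArray([1], [[-1, 0, 1]], 1): A returns False, B returns True; on findZeroArray([0, 0, 0], [[2, 0, 1]], 1): A returns False, B returns True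
import Mathlib
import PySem

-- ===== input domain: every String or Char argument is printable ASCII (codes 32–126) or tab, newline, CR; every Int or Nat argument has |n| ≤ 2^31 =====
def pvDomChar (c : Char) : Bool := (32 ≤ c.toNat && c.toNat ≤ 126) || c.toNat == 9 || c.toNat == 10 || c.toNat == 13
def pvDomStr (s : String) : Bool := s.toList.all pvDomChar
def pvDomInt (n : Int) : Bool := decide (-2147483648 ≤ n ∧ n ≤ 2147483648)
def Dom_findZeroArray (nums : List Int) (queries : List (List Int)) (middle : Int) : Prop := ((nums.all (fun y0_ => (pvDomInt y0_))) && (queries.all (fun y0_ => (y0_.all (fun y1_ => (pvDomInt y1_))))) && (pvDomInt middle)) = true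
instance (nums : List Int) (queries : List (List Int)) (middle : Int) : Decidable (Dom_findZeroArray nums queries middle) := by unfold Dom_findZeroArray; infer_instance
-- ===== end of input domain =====

-- B replaces A's difference array + prefix-sum pass by direct per-query inclusive range subtraction on a copy of nums (objective: simpler).

-- ===== PORT A =====
-- early-return scan 'for num in copy: if num > 0: return False / return True'
def pvCheckA : List Int → Bool
  | [] => true
  | num :: rest => if num > 0 then false else pvCheckA rest

def findZeroArray (nums : List Int) (queries : List (List Int)) (middle : Int) : Bool :=
  let copy := nums
  let track : List Int := List.replicate (copy.length + 1) 0
  let track := (PySem.List.pyRange 0 middle).foldl (fun track index =>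
    let q := PySem.List.pyGetD queries index []
    let left := PySem.List.pyGetD q 0 0
    let right := PySem.List.pyGetD q 1 0
    let value := PySem.List.pyGetD q 2 0
    let track := PySem.List.pySetD track left (PySem.List.pyGetD track left 0 - value)
    PySem.List.pySetD track (right + 1) (PySem.List.pyGetD track (right + 1) 0 + value)) track
  let st := (PySem.List.pyRange 0 (copy.length : Int)).foldl (fun (st : Int × List Int) index =>
    let currSubtract := st.1 + PySem.List.pyGetD track index 0
    (currSubtract, PySem.List.pySetD st.2 index (PySem.List.pyGetD st.2 index 0 + currSubtract))) ((0 : Int), copy)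
  pvCheckA st.2

-- ===== PORT B =====
def findZeroArray_alt (nums : List Int) (queries : List (List Int)) (middle : Int) : Bool :=
  let copy := (PySem.List.pyRange 0 middle).foldl (fun copy index =>
    let q := PySem.List.pyGetD queries index []
    let left := PySem.List.pyGetD q 0 0
    let right := PySem.List.pyGetD q 1 0
    let value := PySem.List.pyGetD q 2 0
    (PySem.List.pyRange left (right + 1)).foldl (fun copy i =>
      PySem.List.pySetD copy i (PySem.List.pyGetD copy i 0 - value)) copy) nums
  copy.all (fun num => decide (num ≤ 0))

-- ===== PRECONDITION & SPEC =====
-- Pre_ excludes middle > len(queries) and first-middle queries shorter than 3 entries (A raises IndexError there),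
-- and first-middle queries whose indices fall outside 0 ≤ left ≤ right + 1 ≤ len(nums): on those A either raises
-- or, via negative-index wraparound / a reversed interval in the difference array, returns an accidental value
-- that no caller would specify, and B's range loop produces its own equally accidental value there.
def Pre_findZeroArray (nums : List Int) (queries : List (List Int)) (middle : Int) : Prop :=
  middle ≤ (queries.length : Int) ∧
  ∀ q ∈ queries.take middle.toNat,
    3 ≤ q.length ∧ 0 ≤ q.getD 0 0 ∧ q.getD 0 0 ≤ q.getD 1 0 + 1 ∧ q.getD 1 0 + 1 ≤ (nums.length : Int)
instance (nums : List Int) (queries : List (List Int)) (middle : Int) : Decidable (Pre_findZeroArray nums queries middle) := by unfold Pre_findZeroArray; infer_instance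

def pvWitness_findZeroArray : List Int × List (List Int) × Int := ([1, 2], [[0, 1, 2]], 1)

def Spec_findZeroArray (nums : List Int) (queries : List (List Int)) (middle : Int) (out : Bool) : Prop := out = findZeroArray_alt nums queries middle
instance (nums : List Int) (queries : List (List Int)) (middle : Int) (out : Bool) : Decidable (Spec_findZeroArray nums queries middle out) := by unfold Spec_findZeroArray; infer_instance

-- ===== CLAIM (what is proved, stated in full; the proofs are below) =====
def Claim_equal_findZeroArray : Prop := ∀ (nums : List Int) (queries : List (List Int)) (middle : Int), Dom_findZeroArray nums queries middle → Pre_findZeroArray nums queries middle → Spec_findZeroArray nums queries middle (findZeroArray nums queries middle)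

-- ===== LEMMAS AND PROOFS =====

lemma pv_bridge {α β : Type} (xs : List α) (d : α) (m : Int) (h : m ≤ (xs.length : Int))
    (f : β → α → β) (init : β) :
    (PySem.List.pyRange 0 m).foldl (fun acc j => f acc (PySem.List.pyGetD xs j d)) init
      = (xs.take m.toNat).foldl f init := by
  rcases le_or_gt m 0 with h0 | h0
  · rw [PySem.List.pyRange_one_eq_nil h0, Int.toNat_of_nonpos h0]
    simp
  · have hmn : m.toNat ≤ xs.length := by omega
    have key := PySem.List.foldl_pyRange_zero_pyGetD (xs.take m.toNat) d f init
    have hlen : PySem.List.len (xs.take m.toNat) = m := by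
      simp [PySem.List.len, List.length_take]
      omega
    rw [hlen] at key
    rw [← key]
    apply PySem.List.foldl_congr_mem
    intro acc x hx
    rw [PySem.List.mem_pyRange_one] at hx
    rw [PySem.List.pyGetD_eq_getElem _ _ hx.1 (by omega),
        PySem.List.pyGetD_eq_getElem _ _ hx.1 (by simp [List.length_take]; omega),
        List.getElem_take]

def pvQStep (track : List Int) (q : List Int) : List Int :=
  let left := PySem.List.pyGetD q 0 0
  let right := PySem.List.pyGetD q 1 0
  let value := PySem.List.pyGetD q 2 0
  let track := PySem.List.pySetD track left (PySem.List.pyGetD track left 0 - value)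
  PySem.List.pySetD track (right + 1) (PySem.List.pyGetD track (right + 1) 0 + value)

def pvRStep (copy : List Int) (q : List Int) : List Int :=
  let left := PySem.List.pyGetD q 0 0
  let right := PySem.List.pyGetD q 1 0
  let value := PySem.List.pyGetD q 2 0
  (PySem.List.pyRange left (right + 1)).foldl (fun copy i =>
    PySem.List.pySetD copy i (PySem.List.pyGetD copy i 0 - value)) copy

def pvMix (nums t : List Int) (k : Nat) : List Int :=
  (List.range nums.length).map (fun j =>
    if j < k then nums.getD j 0 + ((t.take (j + 1)).sum) else nums.getD j 0)

lemma pv_mix_length (nums t : List Int) (k : Nat) : (pvMix nums t k).length = nums.length := by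
  simp [pvMix]

lemma pv_mix_getD (nums t : List Int) (k j : Nat) (hj : j < nums.length) :
    (pvMix nums t k).getD j 0
      = if j < k then nums.getD j 0 + ((t.take (j + 1)).sum) else nums.getD j 0 := by
  rw [List.getD_eq_getElem _ _ (by simp [pv_mix_length]; omega)]
  simp [pvMix, List.getElem_map, List.getElem_range, List.getElem?_eq_getElem hj]

lemma pv_eq_of_getD (a b : List Int) (h : a.length = b.length)
    (hg : ∀ j, j < a.length → a.getD j 0 = b.getD j 0) : a = b := by
  apply List.ext_getElem h
  intro j h1 h2
  have := hg j h1
  rwa [List.getD_eq_getElem _ _ h1, List.getD_eq_getElem _ _ h2] at this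

lemma pv_sum_take_set (t : List Int) (i : Nat) (x : Int) (hi : i < t.length) (k : Nat) :
    ((t.set i x).take k).sum = (t.take k).sum + (if i < k then x - t[i] else 0) := by
  rw [List.take_set]
  by_cases h : i < k
  · have hiL : i < (t.take k).length := by simp [List.length_take]; omega
    have h1 := List.sum_set (t.take k) i x
    have h2 := List.sum_take_add_sum_drop (t.take k) i
    have h3 := List.drop_eq_getElem_cons hiL
    have h4 : (t.take k)[i]'hiL = t[i] := List.getElem_take
    rw [h3] at h2
    simp only [List.sum_cons] at h2
    rw [h4] at h2
    rw [h1, if_pos hiL]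
    simp only [h, if_true]
    omega
  · rw [List.set_eq_of_length_le (by simp [List.length_take]; omega)]
    simp [h]

lemma pv_range_sub (v a : Int) (ha : 0 ≤ a) (k : Nat) :
    ∀ c : List Int, a + k ≤ (c.length : Int) →
    ((PySem.List.pyRange a (a + (k : Int))).foldl (fun copy i =>
        PySem.List.pySetD copy i (PySem.List.pyGetD copy i 0 - v)) c).length = c.length ∧
    ∀ j : Nat, j < c.length →
      ((PySem.List.pyRange a (a + (k : Int))).foldl (fun copy i =>
        PySem.List.pySetD copy i (PySem.List.pyGetD copy i 0 - v)) c).getD j 0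
        = c.getD j 0 - (if a ≤ (j : Int) ∧ (j : Int) < a + k then v else 0) := by
  induction k with
  | zero =>
      intro c hc
      rw [show (a + ((0:Nat):Int)) = a from by push_cast; ring, PySem.List.pyRange_one_eq_nil le_rfl]
      simp only [List.foldl_nil]
      constructor
      · trivial
      · intro j hj
        split_ifs <;> omega
  | succ k ih =>
      intro c hc
      have hcast : a + ((k+1 : Nat) : Int) = (a + (k : Int)) + 1 := by push_cast; ring
      rw [hcast, PySem.List.pyRange_one_succ_right (by omega), List.foldl_append]
      obtain ⟨ihlen, ihget⟩ := ih c (by push_cast at hc ⊢; omega)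
      set R := (PySem.List.pyRange a (a + (k : Int))).foldl (fun copy i =>
        PySem.List.pySetD copy i (PySem.List.pyGetD copy i 0 - v)) c with hR
      simp only [List.foldl_cons, List.foldl_nil]
      have hidx : 0 ≤ a + (k : Int) := by omega
      have hlt : a + (k : Int) < (R.length : Int) := by rw [ihlen]; push_cast at hc ⊢; omega
      have htn : (a + (k : Int)).toNat < R.length := by omega
      constructor
      · rw [PySem.List.length_pySetD, ihlen]
      · intro j hj
        rw [PySem.List.pySetD_of_nonneg _ _ hidx]
        by_cases hje : (j : Int) = a + (k : Int)
        · have hjn : (a + (k : Int)).toNat = j := by omega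
          rw [List.getD_eq_getElem _ _ (by rw [List.length_set]; omega), List.getElem_set,
            if_pos hjn]
          rw [PySem.List.pyGetD_eq_getElem _ _ hidx hlt]
          have hRg : R[(a + (k : Int)).toNat] = R.getD (a + (k : Int)).toNat 0 := by
            rw [List.getD_eq_getElem _ _ htn]
          rw [hRg, hjn, ihget j hj]
          split_ifs <;> omega
        · rw [List.getD_eq_getElem _ _ (by rw [List.length_set]; omega), List.getElem_set,
            if_neg (by omega)]
          have hRg : R[j]'(by omega) = R.getD j 0 := by rw [List.getD_eq_getElem _ _ (by omega)]
          rw [hRg, ihget j hj]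
          split_ifs <;> omega

lemma pv_commute (nums t q : List Int)
    (h0 : 0 ≤ q.getD 0 0) (h01 : q.getD 0 0 ≤ q.getD 1 0 + 1) (h1 : q.getD 1 0 + 1 ≤ (nums.length : Int))
    (ht : t.length = nums.length + 1) :
    pvRStep (pvMix nums t nums.length) q = pvMix nums (pvQStep t q) nums.length := by
  unfold pvRStep pvQStep
  rw [PySem.List.pyGetD_ofNat' q 0 0, PySem.List.pyGetD_ofNat' q 1 0, PySem.List.pyGetD_ofNat' q 2 0]
  dsimp only
  set l := q.getD 0 0 with hl
  set r := q.getD 1 0 with hr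
  set v := q.getD 2 0 with hv
  set n := nums.length with hn
  have hk : r + 1 = l + (((r + 1 - l).toNat : Nat) : Int) := by omega
  conv_lhs => rw [hk]
  obtain ⟨hlen, hget⟩ := pv_range_sub v l h0 (r + 1 - l).toNat (pvMix nums t n)
    (by rw [pv_mix_length]; omega)
  have hlt : l.toNat < t.length := by omega
  have hrt : (r + 1).toNat < t.length := by omega
  have hget_l : PySem.List.pyGetD t l 0 = t[l.toNat] :=
    PySem.List.pyGetD_eq_getElem _ _ h0 (by omega)
  rw [hget_l, PySem.List.pySetD_of_nonneg _ _ h0]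
  by_cases hcase : l = r + 1
  · -- degenerate query left = right + 1: empty range on B's side, cancelling writes on A's side
    have hne' : (r + 1).toNat = l.toNat := by omega
    have hget_r : PySem.List.pyGetD (t.set l.toNat (t[l.toNat] - v)) (r + 1) 0
        = t[l.toNat] - v := by
      rw [PySem.List.pyGetD_eq_getElem _ _ (by omega) (by simp [List.length_set]; omega)]
      simp [hne']
    rw [hget_r, PySem.List.pySetD_of_nonneg _ _ (by omega : (0:Int) ≤ r + 1), hne',
      List.set_set, sub_add_cancel, List.set_getElem_self hlt]
    have hk0 : (r + 1 - l).toNat = 0 := by omega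
    rw [hk0]
    rw [show ((0:Nat):Int) = 0 from rfl, add_zero, PySem.List.pyRange_one_eq_nil le_rfl]
    rfl
  · have hne : l.toNat ≠ (r + 1).toNat := by omega
    have hget_r : PySem.List.pyGetD (t.set l.toNat (t[l.toNat] - v)) (r + 1) 0
        = t[(r + 1).toNat] := by
      rw [PySem.List.pyGetD_eq_getElem _ _ (by omega) (by simp [List.length_set]; omega),
        List.getElem_set, if_neg hne]
    rw [hget_r, PySem.List.pySetD_of_nonneg _ _ (by omega : (0:Int) ≤ r + 1)]
    apply pv_eq_of_getD
    · rw [hlen, pv_mix_length, pv_mix_length]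
    · intro j hj
      rw [hlen, pv_mix_length] at hj
      rw [hget j (by rw [pv_mix_length]; exact hj)]
      rw [pv_mix_getD nums t n j hj, pv_mix_getD nums _ n j hj, if_pos hj, if_pos hj]
      rw [pv_sum_take_set _ (r+1).toNat _ (by simp [List.length_set]; omega) (j+1)]
      rw [pv_sum_take_set t l.toNat _ hlt (j+1)]
      rw [List.getElem_set, if_neg hne]
      split_ifs <;> omega

lemma pv_length_pvQStep (track q : List Int) : (pvQStep track q).length = track.length := by
  simp [pvQStep, PySem.List.length_pySetD]

lemma pv_length_foldl_pvQStep (qs : List (List Int)) : ∀ t : List Int,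
    (qs.foldl pvQStep t).length = t.length := by
  induction qs with
  | nil => intro t; rfl
  | cons q qs ih => intro t; simp [List.foldl_cons, ih, pv_length_pvQStep]

lemma pv_mix_zero_track (nums : List Int) :
    pvMix nums (List.replicate (nums.length + 1) 0) nums.length = nums := by
  apply List.ext_getElem (by simp [pv_mix_length])
  intro j h1 h2
  simp [pvMix, List.getElem_map, List.getElem_range, List.take_replicate, List.sum_replicate,
    List.getElem?_eq_getElem h2]

lemma pv_phase2 (nums t : List Int) (k : Nat) (hk : k ≤ nums.length) (ht : nums.length < t.length) :
    (PySem.List.pyRange 0 (k : Int)).foldl (fun (st : Int × List Int) index =>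
        let currSubtract := st.1 + PySem.List.pyGetD t index 0
        (currSubtract, PySem.List.pySetD st.2 index (PySem.List.pyGetD st.2 index 0 + currSubtract)))
      ((0 : Int), nums)
      = ((t.take k).sum, pvMix nums t k) := by
  induction k with
  | zero =>
      rw [show ((0:Nat):Int) = 0 from rfl, PySem.List.pyRange_one_eq_nil le_rfl]
      simp only [List.foldl_nil, List.take_zero, List.sum_nil]
      congr 1
      apply List.ext_getElem (by simp [pv_mix_length])
      intro j h1 h2
      simp [pvMix, List.getElem_map, List.getElem_range, List.getElem?_eq_getElem h1]
  | succ k ih =>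
      have hk' : k ≤ nums.length := by omega
      have hcast : ((k + 1 : Nat) : Int) = (k : Int) + 1 := by push_cast; ring
      rw [hcast, PySem.List.pyRange_one_succ_right (by positivity), List.foldl_append,
        ih hk']
      simp only [List.foldl_cons, List.foldl_nil]
      have hkt : k < t.length := by omega
      have hgt : PySem.List.pyGetD t (k : Int) 0 = t[k] := by
        rw [PySem.List.pyGetD_natCast, List.getD_eq_getElem _ _ hkt]
      have hsum : (t.take k).sum + PySem.List.pyGetD t (k : Int) 0 = (t.take (k+1)).sum := by
        rw [hgt, List.sum_take_succ t k hkt]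
      have hmixk : PySem.List.pyGetD (pvMix nums t k) (k : Int) 0 = nums.getD k 0 := by
        rw [PySem.List.pyGetD_natCast]
        rcases Nat.lt_or_ge k nums.length with h | h
        · rw [List.getD_eq_getElem _ _ (by simp [pv_mix_length]; omega)]
          simp [pvMix, List.getElem_map, List.getElem_range, List.getElem?_eq_getElem h]
        · rw [List.getD_eq_default _ _ (by simp [pv_mix_length]; omega),
            List.getD_eq_default _ _ (by omega)]
      simp only [hsum, hmixk, PySem.List.pySetD_natCast]
      congr 1
      apply List.ext_getElem (by simp [pv_mix_length])
      intro j h1 h2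
      rw [List.getElem_set]
      by_cases hjk : k = j
      · subst hjk
        have hknums : k < nums.length := by simp [pv_mix_length] at h2; omega
        simp [pvMix, List.getElem_map, List.getElem_range]
      · have h2' : j < nums.length := by simp [pv_mix_length] at h2; omega
        simp only [if_neg hjk]
        simp [pvMix, List.getElem_map, List.getElem_range]
        omega

lemma pv_main (nums : List Int) (qs : List (List Int))
    (hok : ∀ q ∈ qs, 0 ≤ q.getD 0 0 ∧ q.getD 0 0 ≤ q.getD 1 0 + 1 ∧ q.getD 1 0 + 1 ≤ (nums.length : Int)) :
    ∀ t, t.length = nums.length + 1 →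
      qs.foldl pvRStep (pvMix nums t nums.length) = pvMix nums (qs.foldl pvQStep t) nums.length := by
  induction qs with
  | nil => intro t _; rfl
  | cons q qs ih =>
      intro t ht
      have hq := hok q (by simp)
      calc (q :: qs).foldl pvRStep (pvMix nums t nums.length)
          = qs.foldl pvRStep (pvRStep (pvMix nums t nums.length) q) := rfl
        _ = qs.foldl pvRStep (pvMix nums (pvQStep t q) nums.length) := by
              rw [pv_commute nums t q hq.1 hq.2.1 hq.2.2 ht]
        _ = pvMix nums ((q :: qs).foldl pvQStep t) nums.length := by
              rw [ih (fun q hq => hok q (by simp [hq])) (pvQStep t q)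
                    (by rw [pv_length_pvQStep]; exact ht)]
              rfl

lemma pv_check_all (c : List Int) : pvCheckA c = c.all (fun num => decide (num ≤ 0)) := by
  induction c with
  | nil => rfl
  | cons x xs ih =>
      simp only [pvCheckA, List.all_cons, ih]
      split_ifs with h
      · simp [show ¬ (x ≤ 0) from by omega]
      · simp [show x ≤ 0 from by omega]

-- ===== VERDICT (by name: the statement is the Claim_ definition above) =====
theorem findZeroArray_spec : Claim_equal_findZeroArray := by
  intro nums queries middle _hdom hpre
  obtain ⟨hm, hq⟩ := hpre
  unfold Spec_findZeroArray findZeroArray findZeroArray_alt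
  dsimp only
  rw [pv_bridge queries ([] : List Int) middle hm
        (fun track q =>
          let left := PySem.List.pyGetD q 0 0
          let right := PySem.List.pyGetD q 1 0
          let value := PySem.List.pyGetD q 2 0
          let track := PySem.List.pySetD track left (PySem.List.pyGetD track left 0 - value)
          PySem.List.pySetD track (right + 1) (PySem.List.pyGetD track (right + 1) 0 + value)),
      pv_bridge queries ([] : List Int) middle hm
        (fun copy q =>
          let left := PySem.List.pyGetD q 0 0
          let right := PySem.List.pyGetD q 1 0
          let value := PySem.List.pyGetD q 2 0
          (PySem.List.pyRange left (right + 1)).foldl (fun copy i =>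
            PySem.List.pySetD copy i (PySem.List.pyGetD copy i 0 - value)) copy)]
  have hA : (fun (track : List Int) (q : List Int) =>
      let left := PySem.List.pyGetD q 0 0
      let right := PySem.List.pyGetD q 1 0
      let value := PySem.List.pyGetD q 2 0
      let track := PySem.List.pySetD track left (PySem.List.pyGetD track left 0 - value)
      PySem.List.pySetD track (right + 1) (PySem.List.pyGetD track (right + 1) 0 + value)) = pvQStep := rfl
  have hB : (fun (copy : List Int) (q : List Int) =>
      let left := PySem.List.pyGetD q 0 0
      let right := PySem.List.pyGetD q 1 0
      let value := PySem.List.pyGetD q 2 0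
      (PySem.List.pyRange left (right + 1)).foldl (fun copy i =>
        PySem.List.pySetD copy i (PySem.List.pyGetD copy i 0 - value)) copy) = pvRStep := rfl
  rw [hA, hB]
  have hok : ∀ q ∈ queries.take middle.toNat,
      0 ≤ q.getD 0 0 ∧ q.getD 0 0 ≤ q.getD 1 0 + 1 ∧ q.getD 1 0 + 1 ≤ (nums.length : Int) :=
    fun q hq' => (hq q hq').2
  have htlen : ((queries.take middle.toNat).foldl pvQStep
      (List.replicate (nums.length + 1) 0)).length = nums.length + 1 := by
    rw [pv_length_foldl_pvQStep, List.length_replicate]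
  rw [pv_phase2 nums _ nums.length le_rfl (by omega)]
  dsimp only
  rw [pv_check_all]
  have hfinal : (queries.take middle.toNat).foldl pvRStep nums
      = pvMix nums ((queries.take middle.toNat).foldl pvQStep
          (List.replicate (nums.length + 1) 0)) nums.length := by
    calc (queries.take middle.toNat).foldl pvRStep nums
        = (queries.take middle.toNat).foldl pvRStep
            (pvMix nums (List.replicate (nums.length + 1) 0) nums.length) := by
          rw [pv_mix_zero_track]
      _ = pvMix nums ((queries.take middle.toNat).foldl pvQStep
            (List.replicate (nums.length + 1) 0)) nums.length := by
          rw [pv_main nums _ hok _ (by rw [List.length_replicate])]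
  rw [hfinal]
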